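-- pv_equiv track=rewrite | github.com/hcam93/cse447-project | hunter_ngram_model.py | tokenize_data
-- ===== SOURCE A (Python) =====
-- START_TOKEN = "<START>"
--
-- STOP_TOKEN = "<STOP>"
--
-- def tokenize_data(sentence_array):
--     tokenize_list = []
--     word_freq_dict = dict({})
--     for sentence in sentence_array:
--         sentence = START_TOKEN + " " + sentence + " " + STOP_TOKEN
--         for word in sentence.split(" "):
--             tokenize_list.append(word)
--             if word in word_freq_dict:
--                 word_freq_dict[word] = word_freq_dict[word] + 1
--             else:
--                 word_freq_dict[word] = 1
--     return tokenize_list, word_freq_dict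
-- ===== SOURCE B (Python) =====
-- START_TOKEN = "<START>"
--
-- STOP_TOKEN = "<STOP>"
--
-- def tokenize_data(sentence_array):
--     if not sentence_array:
--         return [], {}
--     # glue every sentence into ONE string with the boundary markers in between,
--     # split that string once, then count in a separate pass
--     glue = " " + STOP_TOKEN + " " + START_TOKEN + " "
--     big = START_TOKEN + " " + glue.join(sentence_array) + " " + STOP_TOKEN
--     tokenize_list = big.split(" ")
--     word_freq_dict = {}
--     for word in tokenize_list:
--         word_freq_dict[word] = word_freq_dict.get(word, 0) + 1
--     return tokenize_list, word_freq_dict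
-- ===== Notes on version B (the rewrite author's own statement) =====
-- stated objective: alternative
-- what changed: B joins all sentences into one big string with the boundary markers as glue, splits that string once, and counts frequencies in a separate second pass, replacing A's per-sentence split with an interleaved append-and-count inner loop.
import Mathlib
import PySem

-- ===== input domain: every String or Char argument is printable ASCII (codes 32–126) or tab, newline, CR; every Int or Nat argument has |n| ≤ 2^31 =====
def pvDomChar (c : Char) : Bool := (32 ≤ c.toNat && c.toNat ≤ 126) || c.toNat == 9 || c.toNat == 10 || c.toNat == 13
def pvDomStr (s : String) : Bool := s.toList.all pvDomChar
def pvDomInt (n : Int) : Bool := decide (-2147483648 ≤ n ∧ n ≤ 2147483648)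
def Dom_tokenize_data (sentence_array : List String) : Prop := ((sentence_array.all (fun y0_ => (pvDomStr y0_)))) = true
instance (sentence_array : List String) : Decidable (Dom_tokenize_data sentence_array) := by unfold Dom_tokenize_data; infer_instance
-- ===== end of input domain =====

-- ===== grader preamble kept above =====
-- B builds one glued string from all sentences and splits it once, then counts in a second pass (objective: alternative decomposition).

-- ===== PORT A =====
-- shared helper: Python's s.split(" ") (sep nonempty, so split? is always some)
def pySplit (s : String) : List String := (PySem.Str.split? s " ").getD []

def tokenize_data (sentence_array : List String) : List String × (List (String × Int)) :=
  let st := sentence_array.foldl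
    (fun (st : List String × PySem.Dict String Int) sentence =>
      let sentence := "<START>" ++ " " ++ sentence ++ " " ++ "<STOP>"
      (pySplit sentence).foldl
        (fun st word =>
          let tokenize_list := st.1 ++ [word]
          let word_freq_dict :=
            if st.2.contains word then st.2.insert word (st.2.getD word 0 + 1)
            else st.2.insert word 1
          (tokenize_list, word_freq_dict)) st)
    ([], PySem.Dict.empty)
  (st.1, st.2.items)

-- ===== PORT B =====
def tokenize_data_alt (sentence_array : List String) : List String × (List (String × Int)) :=
  if sentence_array.isEmpty then ([], [])
  else
    let tokenize_list := pySplit ("<START>" ++ " " ++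
      PySem.Str.join (" " ++ "<STOP>" ++ " " ++ "<START>" ++ " ") sentence_array ++ " " ++ "<STOP>")
    (tokenize_list,
     (tokenize_list.foldl (fun d word => d.insert word (d.getD word 0 + 1)) PySem.Dict.empty).items)

-- ===== PRECONDITION & SPEC =====
def Spec_tokenize_data (sentence_array : List String) (out : List String × (List (String × Int))) : Prop := out = tokenize_data_alt sentence_array
instance (sentence_array : List String) (out : List String × (List (String × Int))) : Decidable (Spec_tokenize_data sentence_array out) := by unfold Spec_tokenize_data; infer_instance

-- ===== CLAIM (what is proved, stated in full; the proofs are below) =====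
def Claim_equal_tokenize_data : Prop := ∀ (sentence_array : List String), Dom_tokenize_data sentence_array → Spec_tokenize_data sentence_array (tokenize_data sentence_array)

-- ===== LEMMAS AND PROOFS =====

theorem upd_eq (d : PySem.Dict String Int) (w : String) :
    (if d.contains w then d.insert w (d.getD w 0 + 1) else d.insert w 1)
      = d.insert w (d.getD w 0 + 1) := by
  by_cases h : d.contains w = true
  · simp [h]
  · have h' : d.contains w = false := by simpa using h
    have h0 : d.getD w 0 = 0 := by simp [PySem.Dict.getD_of_not_contains, h']
    simp [h', h0]

theorem inner_eq (l : List String) (st : List String × PySem.Dict String Int) :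
    l.foldl (fun st word =>
        let tokenize_list := st.1 ++ [word]
        let word_freq_dict :=
          if st.2.contains word then st.2.insert word (st.2.getD word 0 + 1)
          else st.2.insert word 1
        (tokenize_list, word_freq_dict)) st
      = (st.1 ++ l, l.foldl (fun d w => d.insert w (d.getD w 0 + 1)) st.2) := by
  induction l generalizing st with
  | nil => simp
  | cons w ws ih =>
    simp only [List.foldl_cons]
    rw [ih]
    simp [upd_eq, List.append_assoc]

theorem outer_eq (sa : List String) (st : List String × PySem.Dict String Int) :
    sa.foldl (fun st sentence =>
        (st.1 ++ pySplit ("<START>" ++ " " ++ sentence ++ " " ++ "<STOP>"),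
         (pySplit ("<START>" ++ " " ++ sentence ++ " " ++ "<STOP>")).foldl
           (fun d w => d.insert w (d.getD w 0 + 1)) st.2)) st
      = (st.1 ++ sa.flatMap (fun s => pySplit ("<START>" ++ " " ++ s ++ " " ++ "<STOP>")),
         (sa.flatMap (fun s => pySplit ("<START>" ++ " " ++ s ++ " " ++ "<STOP>"))).foldl
           (fun d w => d.insert w (d.getD w 0 + 1)) st.2) := by
  induction sa generalizing st with
  | nil => simp
  | cons s ss ih =>
    simp only [List.foldl_cons]
    rw [ih]
    simp [List.foldl_append, List.append_assoc]

-- natural single-character splitter: spc c pre l = the pieces of (pre ++ l) split at c, pre having no c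
def spc (c : Char) (pre : List Char) : List Char → List (List Char)
  | [] => [pre]
  | x :: xs => if x = c then pre :: spc c [] xs else spc c (pre ++ [x]) xs

theorem go_char (c : Char) : ∀ (fuel : Nat) (l cur : List Char) (acc : List (List Char)),
    l.length < fuel →
    PySem.Chars.splitOn.go [c] fuel l cur acc = acc.reverse ++ spc c cur.reverse l := by
  intro fuel
  induction fuel with
  | zero => intro l cur acc h; omega
  | succ n ih =>
    intro l cur acc h
    cases l with
    | nil => simp [PySem.Chars.splitOn.go, spc]
    | cons x xs =>
      rw [PySem.Chars.splitOn.go]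
      by_cases hx : x = c
      · subst hx
        have hpre : [x].isPrefixOf (x :: xs) = true := by simp [List.isPrefixOf]
        simp only [hpre, if_pos]
        rw [ih _ _ _ (by simpa using Nat.lt_of_succ_lt_succ h)]
        simp [spc]
      · have hpre : [c].isPrefixOf (x :: xs) = false := by
          simp [List.isPrefixOf]
          intro hcx; exact absurd hcx.symm hx
        simp only [hpre, Bool.false_eq_true, if_neg, not_false_iff]
        rw [ih _ _ _ (by simpa using Nat.lt_of_succ_lt_succ h)]
        simp [spc, hx]

theorem splitOn_char (c : Char) (l : List Char) :
    PySem.Chars.splitOn l [c] = spc c [] l := by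
  have := go_char c (l.length + 1) l [] [] (by omega)
  simpa [PySem.Chars.splitOn] using this

theorem spc_hom (c : Char) : ∀ (a b pre : List Char),
    spc c pre (a ++ c :: b) = spc c pre a ++ spc c [] b := by
  intro a
  induction a with
  | nil => intro b pre; simp [spc]
  | cons x xs ih => intro b pre; by_cases hx : x = c <;> simp [spc, hx, ih]

theorem splitOn_hom (c : Char) (a b : List Char) :
    PySem.Chars.splitOn (a ++ c :: b) [c] = PySem.Chars.splitOn a [c] ++ PySem.Chars.splitOn b [c] := by
  simp [splitOn_char, spc_hom]

theorem pySplit_eq (s : String) :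
    pySplit s = (PySem.Chars.splitOn s.toList [' ']).map String.ofList := by
  have h : (" " : String).toList = [' '] := by decide
  simp [pySplit, PySem.Str.split?, PySem.Chars.split?, h]

theorem join_split (x : List Char) (xs : List (List Char)) :
    PySem.Chars.splitOn ("<START>".toList ++ [' '] ++ PySem.Chars.join
        ([' '] ++ "<STOP>".toList ++ [' '] ++ "<START>".toList ++ [' ']) (x :: xs) ++ [' '] ++ "<STOP>".toList) [' ']
    = (x :: xs).flatMap (fun s => PySem.Chars.splitOn ("<START>".toList ++ [' '] ++ s ++ [' '] ++ "<STOP>".toList) [' ']) := by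
  induction xs generalizing x with
  | nil => simp [PySem.Chars.join, List.intercalate, List.intersperse]
  | cons y ys ih =>
    have hj : PySem.Chars.join ([' '] ++ "<STOP>".toList ++ [' '] ++ "<START>".toList ++ [' ']) (x :: y :: ys)
        = x ++ ([' '] ++ "<STOP>".toList ++ [' '] ++ "<START>".toList ++ [' ']) ++
          PySem.Chars.join ([' '] ++ "<STOP>".toList ++ [' '] ++ "<START>".toList ++ [' ']) (y :: ys) := by
      simp [PySem.Chars.join, List.intercalate, List.intersperse_cons₂, List.append_assoc]
    have harg : "<START>".toList ++ [' '] ++ (x ++ ([' '] ++ "<STOP>".toList ++ [' '] ++ "<START>".toList ++ [' ']) ++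
          PySem.Chars.join ([' '] ++ "<STOP>".toList ++ [' '] ++ "<START>".toList ++ [' ']) (y :: ys)) ++ [' '] ++ "<STOP>".toList
        = ("<START>".toList ++ [' '] ++ x ++ [' '] ++ "<STOP>".toList) ++ ' ' ::
          ("<START>".toList ++ [' '] ++ PySem.Chars.join ([' '] ++ "<STOP>".toList ++ [' '] ++ "<START>".toList ++ [' ']) (y :: ys) ++ [' '] ++ "<STOP>".toList) := by
      simp [List.append_assoc]
    rw [hj, harg, splitOn_hom, ih y]
    simp

theorem alt_tokens (x : String) (xs : List String) :
    pySplit ("<START>" ++ " " ++ PySem.Str.join (" " ++ "<STOP>" ++ " " ++ "<START>" ++ " ") (x :: xs) ++ " " ++ "<STOP>")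
    = (x :: xs).flatMap (fun s => pySplit ("<START>" ++ " " ++ s ++ " " ++ "<STOP>")) := by
  have hsp : (" " : String).toList = [' '] := by decide
  simp only [pySplit_eq, String.toList_append, PySem.Str.toList_join, hsp, List.map_cons]
  rw [join_split]
  simp [List.map_flatMap, List.flatMap_map]

-- ===== VERDICT (by name: the statement is the Claim_ definition above) =====
theorem tokenize_data_spec : Claim_equal_tokenize_data := by
  intro sa _
  show tokenize_data sa = tokenize_data_alt sa
  unfold tokenize_data tokenize_data_alt
  cases sa with
  | nil => simp [PySem.Dict.empty]
  | cons x xs =>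
    simp only [inner_eq, outer_eq, List.nil_append, List.isEmpty_cons, Bool.false_eq_true, if_neg,
      not_false_iff, alt_tokens]
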